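-- pv_equiv track=rewrite | github.com/autumngarage/cortex | src/cortex/validation.py | _collect_h2_headings
-- ===== SOURCE A (Python) =====
-- def _collect_h2_headings(body: str) -> set[str]:
--     """Return the set of ``## `` headings in ``body``, excluding lines inside
--     fenced code blocks (```` ``` ```` or ``~~~``). Matches CommonMark fences.
--     """
--     headings: set[str] = set()
--     fence: str | None = None
--     for raw_line in body.splitlines():
--         stripped = raw_line.lstrip()
--         if fence is None:
--             if stripped.startswith("```") or stripped.startswith("~~~"):
--                 fence = stripped[:3]
--                 continue
--             if raw_line.startswith("## "):
--                 headings.add(raw_line.strip())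
--         elif stripped.startswith(fence):
--             fence = None
--     return headings
-- ===== SOURCE B (Python) =====
-- def _collect_h2_headings(body: str) -> set[str]:
--     """Nested-loop rewrite: no fence-state variable. When a fence opener is
--     met, an inner loop on the shared iterator consumes lines up to and
--     including the matching closer; headings are collected in the outer loop."""
--     headings: set[str] = set()
--     it = iter(body.splitlines())
--     for line in it:
--         stripped = line.lstrip()
--         if stripped.startswith(("```", "~~~")):
--             fence = stripped[:3]
--             for inner in it:
--                 if inner.lstrip().startswith(fence):
--                     break
--         elif line.startswith("## "):
--             headings.add(line.strip())
--     return headings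
-- ===== Notes on version B (the rewrite author's own statement) =====
-- stated objective: alternative
-- what changed: Replaced A's single-pass state machine (an Optional fence flag threaded through every line) by a stateless nested-loop structure: the outer loop only ever sees lines outside code blocks, and on a fence opener an inner loop over the shared iterator skips through the matching closer.
import Mathlib
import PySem

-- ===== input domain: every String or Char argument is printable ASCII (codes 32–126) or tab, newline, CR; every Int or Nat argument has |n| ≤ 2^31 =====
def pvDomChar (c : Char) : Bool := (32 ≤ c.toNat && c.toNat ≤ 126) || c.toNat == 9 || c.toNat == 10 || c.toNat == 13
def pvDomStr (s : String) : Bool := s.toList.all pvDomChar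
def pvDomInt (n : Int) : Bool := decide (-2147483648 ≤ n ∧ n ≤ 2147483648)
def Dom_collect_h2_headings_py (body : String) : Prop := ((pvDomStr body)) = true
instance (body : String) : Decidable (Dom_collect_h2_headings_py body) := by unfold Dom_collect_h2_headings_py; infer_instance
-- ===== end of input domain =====

-- B replaces A's fence-state machine by a nested skip-loop decomposition; objective: alternative, same cost.

-- ===== PORT A =====
-- single pass: Optional fence state + heading set threaded through every line
def collectA : List String → Option String → PySem.Set String → PySem.Set String
  | [], _, h => h
  | raw :: ls, fence, h =>
    let stripped := PySem.Str.lstrip raw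
    match fence with
    | none =>
      if PySem.Str.startswith stripped "```" || PySem.Str.startswith stripped "~~~" then
        collectA ls (some (PySem.Str.slice stripped none (some 3))) h
      else if PySem.Str.startswith raw "## " then
        collectA ls none (PySem.Set.add h (PySem.Str.strip raw))
      else
        collectA ls none h
    | some f =>
      if PySem.Str.startswith stripped f then collectA ls none h
      else collectA ls (some f) h

def collect_h2_headings_py (body : String) : List String :=
  collectA (PySem.Str.splitlines body) none PySem.Set.empty

-- ===== PORT B =====
-- inner loop: consume lines up to and including the matching fence closer
def skipB (f : String) : List String → List String
  | [] => []
  | l :: ls => if PySem.Str.startswith (PySem.Str.lstrip l) f then ls else skipB f ls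

theorem skipB_length_le (f : String) (ls : List String) : (skipB f ls).length ≤ ls.length := by
  induction ls with
  | nil => simp [skipB]
  | cons l ls ih =>
    simp only [skipB]
    split
    · simp
    · exact Nat.le_succ_of_le ih

-- outer loop: only sees lines outside code blocks; no fence state
def collectB : List String → PySem.Set String → PySem.Set String
  | [], h => h
  | line :: ls, h =>
    let stripped := PySem.Str.lstrip line
    if PySem.Str.startswith stripped "```" || PySem.Str.startswith stripped "~~~" then
      collectB (skipB (PySem.Str.slice stripped none (some 3)) ls) h
    else if PySem.Str.startswith line "## " then
      collectB ls (PySem.Set.add h (PySem.Str.strip line))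
    else
      collectB ls h
termination_by ls _ => ls.length
decreasing_by
  · exact Nat.lt_succ_of_le (skipB_length_le _ _)
  · simp
  · simp

def collect_h2_headings_py_alt (body : String) : List String :=
  collectB (PySem.Str.splitlines body) PySem.Set.empty

-- ===== PRECONDITION & SPEC =====
def Spec_collect_h2_headings_py (body : String) (out : List String) : Prop := out = collect_h2_headings_py_alt body
instance (body : String) (out : List String) : Decidable (Spec_collect_h2_headings_py body out) := by unfold Spec_collect_h2_headings_py; infer_instance

-- ===== CLAIM (what is proved, stated in full; the proofs are below) =====
def Claim_equal_collect_h2_headings_py : Prop := ∀ (body : String), Dom_collect_h2_headings_py body → Spec_collect_h2_headings_py body (collect_h2_headings_py body)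

-- ===== LEMMAS AND PROOFS =====
-- A's fenced state run equals restarting A (in no-fence state) after B's skip
theorem collectA_some_eq_skip (ls : List String) : ∀ (f : String) (h : PySem.Set String),
    collectA ls (some f) h = collectA (skipB f ls) none h := by
  induction ls with
  | nil => intro f h; simp [collectA, skipB]
  | cons l ls ih =>
    intro f h
    by_cases hc : PySem.Chars.startswith (PySem.Chars.lstrip l.toList) f.toList = true
    · simp [collectA, skipB, PySem.Str.startswith, PySem.Str.lstrip, hc]
    · simp [collectA, skipB, PySem.Str.startswith, PySem.Str.lstrip, hc, ih]

theorem collectA_none_eq_collectB (n : Nat) : ∀ (ls : List String), ls.length ≤ n →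
    ∀ (h : PySem.Set String), collectA ls none h = collectB ls h := by
  induction n with
  | zero =>
    intro ls hlen h
    have : ls = [] := List.eq_nil_of_length_eq_zero (Nat.le_zero.mp hlen)
    subst this; simp [collectA, collectB]
  | succ n ih =>
    intro ls hlen h
    match ls with
    | [] => simp [collectA, collectB]
    | raw :: ls =>
      by_cases hf : (PySem.Str.startswith (PySem.Str.lstrip raw) "```"
          || PySem.Str.startswith (PySem.Str.lstrip raw) "~~~") = true
      · have hlen' : (skipB (PySem.Str.slice (PySem.Str.lstrip raw) none (some 3)) ls).length ≤ n :=
          le_trans (skipB_length_le _ _) (Nat.succ_le_succ_iff.mp hlen)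
        simp only [collectA, collectB, hf, if_pos]
        rw [collectA_some_eq_skip]
        exact ih _ hlen' h
      · have hlen' : ls.length ≤ n := Nat.succ_le_succ_iff.mp hlen
        by_cases hh : PySem.Str.startswith raw "## " = true
        · simp only [collectA, collectB, hf, hh, if_neg, if_pos, Bool.false_eq_true,
            not_false_eq_true]
          exact ih _ hlen' _
        · simp only [collectA, collectB, hf, hh, if_neg, Bool.false_eq_true, not_false_eq_true]
          exact ih _ hlen' _

-- ===== VERDICT (by name: the statement is the Claim_ definition above) =====
theorem collect_h2_headings_py_spec : Claim_equal_collect_h2_headings_py := by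
  intro body _
  unfold Spec_collect_h2_headings_py collect_h2_headings_py collect_h2_headings_py_alt
  exact collectA_none_eq_collectB _ _ le_rfl _
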